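-- pv_equiv track=rewrite | github.com/qaz027/zzPractice | ProcessingArrays.py | encrypted_song
-- ===== SOURCE A (Python) =====
-- def encrypted_song(numbers, string):
--     i = 0
--     total = 0
--
--     transformed_string = ''
--
--     while total < 100 and i < len(string):
--         num = 0
--
--         if string[i] in 'aeiou':
--             break
--
--         transformed_string += 'z' if string[i] == 'a' else chr(ord(string[i]) - 1)
--
--         if numbers[i] > 0:
--             num = numbers[i]
--         else:
--             num = numbers[i] * -1
--
--         total += 2*num
--         i += 1
--
--
--     return (transformed_string, numbers[i:])
-- ===== SOURCE B (Python) =====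
-- def encrypted_song(numbers, string):
--     n = len(string)
--     # first vowel position in the string (or n if none)
--     stop_v = next((j for j, c in enumerate(string) if c in 'aeiou'), n)
--     # prefix[j] = 2*sum(abs(numbers[:j])): the running total before position j
--     prefix = [0]
--     for x in numbers[:n]:
--         prefix.append(prefix[-1] + 2 * abs(x))
--     # first position whose entering total already reached 100 (or n if none)
--     stop_t = next((j for j, t in enumerate(prefix) if t >= 100), n)
--     i = min(stop_v, stop_t, n)
--     transformed = ''.join('z' if c == 'a' else chr(ord(c) - 1) for c in string[:i])
--     return (transformed, numbers[i:])
-- ===== Notes on version B (the rewrite author's own statement) =====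
-- stated objective: alternative
-- what changed: A fuses decoding and accumulation in one early-exit loop over the string; B computes the stop index without decoding, as the minimum of two independent first-index searches (first vowel in the string; first entry >= 100 in a precomputed prefix-sum list of 2*|numbers|) and then decodes the prefix in one join.
import Mathlib
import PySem

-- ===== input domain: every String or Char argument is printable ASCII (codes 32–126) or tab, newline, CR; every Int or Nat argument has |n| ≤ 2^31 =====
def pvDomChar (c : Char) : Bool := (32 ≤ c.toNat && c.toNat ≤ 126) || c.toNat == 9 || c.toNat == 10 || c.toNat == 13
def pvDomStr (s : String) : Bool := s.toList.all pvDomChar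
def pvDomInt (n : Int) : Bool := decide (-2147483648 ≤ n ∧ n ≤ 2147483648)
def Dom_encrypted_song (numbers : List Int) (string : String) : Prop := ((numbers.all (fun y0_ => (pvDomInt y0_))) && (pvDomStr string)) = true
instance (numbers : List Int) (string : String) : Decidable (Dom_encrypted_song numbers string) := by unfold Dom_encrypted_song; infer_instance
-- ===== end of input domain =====

-- B replaces A's fused decode-and-accumulate loop by two independent first-index searches
-- (first vowel; first prefix-sum of 2*|numbers| reaching 100) combined with min, then a
-- one-shot decode of the prefix (objective: alternative; return value only).

-- ===== PORT A =====
-- while total < 100 and i < len(string): … (state: i, total, transformed_string;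
-- rem is string.toList.drop i; numbers[i] via pyGetD — Pre_ keeps the index in range)
def pvALoop (numbers : List Int) (rem : List Char) (i : Nat) (total : Int)
    (acc : List Char) : List Char × Nat :=
  match rem with
  | [] => (acc, i)
  | c :: rest =>
    if total < 100 then
      if ['a','e','i','o','u'].contains c then (acc, i)
      else
        let t := if c = 'a' then 'z' else Char.ofNat (c.toNat - 1)
        let n0 := PySem.List.pyGetD numbers (i : Int) 0
        let num := if n0 > 0 then n0 else n0 * (-1)
        pvALoop numbers rest (i + 1) (total + 2 * num) (acc ++ [t])
    else (acc, i)

def encrypted_song (numbers : List Int) (string : String) : String × List Int :=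
  let r := pvALoop numbers string.toList 0 0 []
  (String.mk r.1, PySem.List.slice numbers (some (r.2 : Int)) none)

-- ===== PORT B =====
-- Source B: stop_v = next((j for j,c in enumerate(string) if c in 'aeiou'), n)
def pvVowelIdx (cs : List Char) : Nat := cs.findIdx (fun c => ['a','e','i','o','u'].contains c)

-- Source B: prefix = [0]; for x in numbers[:n]: prefix.append(prefix[-1] + 2*abs(x))
def pvPrefixes (xs : List Int) (t : Int) : List Int :=
  match xs with
  | [] => [t]
  | x :: rest => t :: pvPrefixes rest (t + 2 * |x|)

-- Source B: stop_t = next((j for j,t in enumerate(prefix) if t >= 100), n)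
def pvThreshIdx (ps : List Int) (n : Nat) : Nat :=
  match ps.findIdx? (fun t => decide (t ≥ 100)) with
  | some j => j
  | none => n

-- the per-character decode of Source B's join
def pvTf (c : Char) : Char := if c = 'a' then 'z' else Char.ofNat (c.toNat - 1)

def encrypted_song_alt (numbers : List Int) (string : String) : String × List Int :=
  let n := string.toList.length
  let stopV := pvVowelIdx string.toList
  let stopT := pvThreshIdx (pvPrefixes (numbers.take n) 0) n
  let i := min (min stopV stopT) n
  (String.mk ((string.toList.take i).map pvTf), numbers.drop i)

-- ===== PRECONDITION & SPEC =====
-- Pre_ excludes exactly the inputs where A raises IndexError: numbers is shorter than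
-- string, no vowel stops the loop within the first numbers.length+1 characters, and the
-- total 2*Σ|numbers| never reaches 100.
def Pre_encrypted_song (numbers : List Int) (string : String) : Prop :=
  ¬ (numbers.length < string.toList.length ∧
     (∀ c ∈ string.toList.take (numbers.length + 1),
        ¬ (c = 'a' ∨ c = 'e' ∨ c = 'i' ∨ c = 'o' ∨ c = 'u')) ∧
     2 * (numbers.map (fun n => |n|)).sum < 100)
instance (numbers : List Int) (string : String) : Decidable (Pre_encrypted_song numbers string) := by
  unfold Pre_encrypted_song; infer_instance

def pvWitness_encrypted_song : List Int × String := ([1, 2, 3], "bcd")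

def Spec_encrypted_song (numbers : List Int) (string : String) (out : String × List Int) : Prop := out = encrypted_song_alt numbers string
instance (numbers : List Int) (string : String) (out : String × List Int) : Decidable (Spec_encrypted_song numbers string out) := by unfold Spec_encrypted_song; infer_instance

-- ===== CLAIM (what is proved, stated in full; the proofs are below) =====
def Claim_equal_encrypted_song : Prop := ∀ (numbers : List Int) (string : String), Dom_encrypted_song numbers string → Pre_encrypted_song numbers string → Spec_encrypted_song numbers string (encrypted_song numbers string)
-- ===== LEMMAS AND PROOFS =====

-- proof-side helper: A's loop with the decoding stripped away (stop index only)
def pvStop (numbers : List Int) (rem : List Char) (i : Nat) (total : Int) : Nat :=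
  match rem with
  | [] => i
  | c :: rest =>
    if total < 100 then
      if ['a','e','i','o','u'].contains c then i
      else pvStop numbers rest (i + 1) (total + 2 * |PySem.List.pyGetD numbers (i : Int) 0|)
    else i

-- position-free version of pvStop, consuming the remaining numbers structurally
def pvStopRel (xs : List Int) (cs : List Char) (t : Int) : Nat :=
  match cs with
  | [] => 0
  | c :: rest =>
    if t < 100 then
      if ['a','e','i','o','u'].contains c then 0
      else
        match xs with
        | [] => 1 + pvStopRel [] rest t
        | x :: xr => 1 + pvStopRel xr rest (t + 2 * |x|)
    else 0

theorem pvStop_ge (numbers : List Int) : ∀ (rem : List Char) (i : Nat) (total : Int),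
    i ≤ pvStop numbers rem i total := by
  intro rem
  induction rem with
  | nil => intro i total; simp [pvStop]
  | cons c rest ih =>
    intro i total
    simp only [pvStop]
    split
    · split
      · exact le_refl i
      · exact le_trans (Nat.le_succ i) (ih (i + 1) _)
    · exact le_refl i

-- A's fused loop = decoded prefix up to pvStop, paired with pvStop
theorem pvALoop_eq (numbers : List Int) : ∀ (rem : List Char) (i : Nat) (total : Int)
    (acc : List Char),
    pvALoop numbers rem i total acc =
      (acc ++ (rem.take (pvStop numbers rem i total - i)).map pvTf,
       pvStop numbers rem i total) := by
  intro rem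
  induction rem with
  | nil => intro i total acc; simp [pvALoop, pvStop]
  | cons c rest ih =>
    intro i total acc
    simp only [pvALoop, pvStop]
    split
    · split
      · simp
      · have habs : (if PySem.List.pyGetD numbers (i : Int) 0 > 0
              then PySem.List.pyGetD numbers (i : Int) 0
              else PySem.List.pyGetD numbers (i : Int) 0 * (-1))
            = |PySem.List.pyGetD numbers (i : Int) 0| := by
          set n0 := PySem.List.pyGetD numbers (i : Int) 0 with hn0
          by_cases h : n0 > 0
          · simp [h, abs_of_pos h]
          · rw [if_neg h, abs_of_nonpos (by omega)]; ring
        simp only [habs]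
        rw [ih (i + 1) _ (acc ++ [if c = 'a' then 'z' else Char.ofNat (c.toNat - 1)])]
        have hge : i + 1 ≤ pvStop numbers rest (i + 1)
            (total + 2 * |PySem.List.pyGetD numbers (i : Int) 0|) := pvStop_ge numbers rest _ _
        set b := pvStop numbers rest (i + 1)
            (total + 2 * |PySem.List.pyGetD numbers (i : Int) 0|) with hb
        have hsub : b - i = (b - (i + 1)) + 1 := by omega
        rw [hsub]
        simp [List.take_succ_cons, pvTf]
    · simp

theorem pvStop_eq_rel (numbers : List Int) : ∀ (rem : List Char) (i : Nat) (total : Int),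
    pvStop numbers rem i total = i + pvStopRel (numbers.drop i) rem total := by
  intro rem
  induction rem with
  | nil => intro i total; simp [pvStop, pvStopRel]
  | cons c rest ih =>
    intro i total
    simp only [pvStop, pvStopRel]
    split
    · split
      · simp
      · cases hd : numbers.drop i with
        | nil =>
          have hlen : numbers.length ≤ i := by
            by_contra hlt
            exact absurd hd (by simp [List.drop_eq_nil_iff]; omega)
          have hget : PySem.List.pyGetD numbers (i : Int) 0 = 0 := by
            simp [PySem.List.pyGetD_natCast, List.getD_eq_getElem?_getD,
              List.getElem?_eq_none hlen]
          have hd1 : numbers.drop (i + 1) = [] := by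
            simp [List.drop_eq_nil_iff]; omega
          rw [ih (i + 1)]
          simp only [hget, hd1, abs_zero, mul_zero, add_zero]
          omega
        | cons x xr =>
          have hi : i < numbers.length := by
            by_contra hge
            simp [List.drop_eq_nil_iff.mpr (by omega : numbers.length ≤ i)] at hd
          have hcons := List.drop_eq_getElem_cons hi
          rw [hd] at hcons
          have hx1 : x = numbers[i] := (List.cons_eq_cons.mp hcons).1
          have hx2 : xr = numbers.drop (i + 1) := (List.cons_eq_cons.mp hcons).2
          have hget : PySem.List.pyGetD numbers (i : Int) 0 = x := by
            simp [PySem.List.pyGetD_natCast, List.getD_eq_getElem?_getD,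
              List.getElem?_eq_getElem hi, hx1]
          rw [ih (i + 1)]
          simp only [hget, ← hx2]
          omega
    · simp

-- pvStopRel computes exactly B's min-of-two-searches formula
theorem pvStopRel_eq_min : ∀ (cs : List Char) (xs : List Int) (t : Int),
    pvStopRel xs cs t =
      min (min (pvVowelIdx cs) (pvThreshIdx (pvPrefixes (xs.take cs.length) t) cs.length))
        cs.length := by
  intro cs
  induction cs with
  | nil => intro xs t; simp [pvStopRel, pvVowelIdx, pvThreshIdx, pvPrefixes]
  | cons c rest ih =>
    intro xs t
    simp only [pvStopRel]
    by_cases ht : t < 100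
    · rw [if_pos ht]
      by_cases hv : (['a','e','i','o','u'].contains c) = true
      · rw [if_pos hv]
        have hvi0 : pvVowelIdx (c :: rest) = 0 := by
          simp only [pvVowelIdx, List.findIdx_cons, hv, cond_true]
        simp [hvi0]
      · rw [if_neg hv]
        have hvb : (['a','e','i','o','u'].contains c) = false := by
          simpa using hv
        have hvi : pvVowelIdx (c :: rest) = pvVowelIdx rest + 1 := by
          simp only [pvVowelIdx, List.findIdx_cons, hvb, cond_false]
        cases xs with
        | nil =>
          show 1 + pvStopRel [] rest t = _
          have hth : pvThreshIdx (pvPrefixes (([] : List Int).take (c :: rest).length) t)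
              (c :: rest).length = (c :: rest).length := by
            simp [pvPrefixes, pvThreshIdx, List.findIdx?_cons, show ¬ (t ≥ 100) by omega]
          have hth2 : pvThreshIdx (pvPrefixes (([] : List Int).take rest.length) t)
              rest.length = rest.length := by
            simp [pvPrefixes, pvThreshIdx, List.findIdx?_cons, show ¬ (t ≥ 100) by omega]
          rw [ih [] t, hth, hvi, hth2]
          simp only [List.length_cons]
          omega
        | cons x xr =>
          show 1 + pvStopRel xr rest (t + 2 * |x|) = _
          have hpre : pvPrefixes ((x :: xr).take (c :: rest).length) t
              = t :: pvPrefixes (xr.take rest.length) (t + 2 * |x|) := by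
            simp [pvPrefixes]
          have hth : pvThreshIdx (pvPrefixes ((x :: xr).take (c :: rest).length) t)
                (c :: rest).length
              = pvThreshIdx (pvPrefixes (xr.take rest.length) (t + 2 * |x|)) rest.length
                + 1 := by
            rw [hpre]
            simp only [pvThreshIdx, List.findIdx?_cons,
              show (decide (t ≥ 100)) = false by simp; omega]
            cases hfi : (pvPrefixes (xr.take rest.length) (t + 2 * |x|)).findIdx?
                (fun t => decide (t ≥ 100)) with
            | none => simp [List.length_cons]
            | some j => simp
          rw [ih xr (t + 2 * |x|), hvi, hth]
          simp only [List.length_cons]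
          omega
    · rw [if_neg ht]
      have hth : pvThreshIdx (pvPrefixes (xs.take (c :: rest).length) t)
          (c :: rest).length = 0 := by
        cases xs with
        | nil => simp [pvPrefixes, pvThreshIdx, List.findIdx?_cons, show t ≥ 100 by omega]
        | cons x xr => simp [pvPrefixes, pvThreshIdx, List.findIdx?_cons, show t ≥ 100 by omega]
      rw [hth]
      simp

-- ===== VERDICT (by name: the statement is the Claim_ definition above) =====
theorem encrypted_song_spec : Claim_equal_encrypted_song := by
  intro numbers string _hDom _hPre
  unfold Spec_encrypted_song encrypted_song encrypted_song_alt
  rw [pvALoop_eq numbers string.toList 0 0 []]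
  rw [pvStop_eq_rel numbers string.toList 0 0]
  simp only [List.drop_zero, Nat.zero_add, Nat.sub_zero]
  rw [pvStopRel_eq_min string.toList numbers 0]
  refine Prod.ext ?_ ?_
  · simp
  · show PySem.List.slice numbers (some ((_ : Nat) : Int)) none = _
    rw [PySem.List.slice_from_natCast]
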